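-- pv_equiv track=rewrite | github.com/obmakesomething/pdfgrammercheckoreanback | backend/text_preprocessor.py | _normalize_spaces
-- ===== SOURCE A (Python) =====
-- def _normalize_spaces(text, mapping):
--     """
--     패턴 E: 연속된 공백을 하나로 정리
--     예: "안녕   하세요" -> "안녕 하세요"
--     """
--     result = []
--     new_mapping = {}
--     cleaned_idx = 0
--     i = 0
--
--     while i < len(text):
--         char = text[i]
--
--         # 공백이 연속되는 경우
--         if char == ' ':
--             # 첫 공백은 추가
--             result.append(char)
--             new_mapping[cleaned_idx] = mapping.get(i, [i])
--             cleaned_idx += 1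
--             i += 1
--
--             # 연속된 공백은 건너뛰기
--             while i < len(text) and text[i] == ' ':
--                 i += 1
--         else:
--             result.append(char)
--             new_mapping[cleaned_idx] = mapping.get(i, [i])
--             cleaned_idx += 1
--             i += 1
--
--     return ''.join(result), new_mapping
-- ===== SOURCE B (Python) =====
-- def _normalize_spaces(text, mapping):
--     # Token-based algorithm: split on single spaces; between consecutive tokens sits
--     # exactly one separator space, which survives iff its preceding token is non-empty
--     # or it is the first separator of the string.
--     parts = text.split(' ')
--     keep = []
--     pos = 0
--     last = len(parts) - 1
--     for k, part in enumerate(parts):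
--         keep.extend(range(pos, pos + len(part)))
--         pos += len(part)
--         if k < last:
--             if part or k == 0:
--                 keep.append(pos)  # the separator space after this token survives
--             pos += 1
--     cleaned = ''.join(text[i] for i in keep)
--     new_mapping = {j: mapping.get(i, [i]) for j, i in enumerate(keep)}
--     return cleaned, new_mapping
-- ===== Notes on version B (the rewrite author's own statement) =====
-- stated objective: alternative
-- what changed: Replaces A's character-wise while-loop with nested space-skipping by a token-based algorithm: split the text on ' ', walk the token list (each adjacent pair of tokens is separated by exactly one space, which survives iff its token is non-empty or it is the first), then materialise the string and the remapped dict from the surviving indices.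
import Mathlib
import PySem

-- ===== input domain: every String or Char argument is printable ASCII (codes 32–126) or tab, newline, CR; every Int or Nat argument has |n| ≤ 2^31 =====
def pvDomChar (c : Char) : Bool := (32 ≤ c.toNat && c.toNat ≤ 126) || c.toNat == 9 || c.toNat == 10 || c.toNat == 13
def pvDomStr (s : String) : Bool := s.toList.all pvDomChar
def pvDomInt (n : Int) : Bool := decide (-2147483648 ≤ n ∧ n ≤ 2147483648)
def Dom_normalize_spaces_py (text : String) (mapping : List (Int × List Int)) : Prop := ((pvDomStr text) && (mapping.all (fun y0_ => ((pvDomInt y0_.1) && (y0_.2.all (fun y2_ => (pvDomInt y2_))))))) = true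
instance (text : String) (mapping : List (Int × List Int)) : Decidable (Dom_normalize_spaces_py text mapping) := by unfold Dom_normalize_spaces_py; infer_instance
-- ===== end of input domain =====

-- B replaces A's character-wise skip-loop by a token-based algorithm (split on ' ', walk the token list, then materialise); same return value, no speed claim.

-- ===== PORT A =====
-- inner 'while i < len(text) and text[i] == " ": i += 1'
def pvSkipSpaces (cs : List Char) (i : Nat) : Nat :=
  if h : i < cs.length ∧ cs.getD i ' ' = ' ' then pvSkipSpaces cs (i + 1) else i
termination_by cs.length - i
decreasing_by omega

-- needed by pvALoop's termination proof (cited by name in its decreasing_by)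
theorem pvSkipSpaces_ge (cs : List Char) (i : Nat) : i ≤ pvSkipSpaces cs i := by
  induction i using pvSkipSpaces.induct (cs := cs) with
  | case1 i h ih => rw [pvSkipSpaces, dif_pos h]; omega
  | case2 i h => rw [pvSkipSpaces, dif_neg h]

-- A's outer while loop; new_mapping[cleaned_idx] = … always has a fresh key (cleaned_idx is
-- strictly increasing and past keys are smaller), so the Python dict assignment appends at the
-- end: exact as a list append here. mapping.get(i, [i]) is first-match lookup on the
-- association list: List.lookup (exact).
def pvALoop (cs : List Char) (mapping : List (Int × List Int)) (i : Nat) (cidx : Int)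
    (res : List Char) (nm : List (Int × List Int)) : List Char × List (Int × List Int) :=
  if _h : i < cs.length then
    let c := cs.getD i ' '
    let nm' := nm ++ [(cidx, ((mapping.lookup ((i : Int))).getD [(i : Int)]))]
    if c = ' ' then
      pvALoop cs mapping (pvSkipSpaces cs (i + 1)) (cidx + 1) (res ++ [c]) nm'
    else
      pvALoop cs mapping (i + 1) (cidx + 1) (res ++ [c]) nm'
  else (res, nm)
termination_by cs.length - i
decreasing_by
  · have := pvSkipSpaces_ge cs (i + 1)
    omega
  · omega

def normalize_spaces_py (text : String) (mapping : List (Int × List Int)) : String × (List (Int × List Int)) :=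
  let cs := text.toList
  let r := pvALoop cs mapping 0 0 [] []
  (String.ofList r.1, r.2)

-- ===== PORT B =====
-- Source B's for-loop over enumerate(parts): structural recursion on the token list; `first`
-- renders 'k == 0', 't = []' renders 'k = last'; `pos` is Source B's running original position.
def pvWalk (parts : List (List Char)) (pos : Nat) (first : Bool) : List Nat :=
  match parts with
  | [] => []
  | p :: t =>
    let idxs := List.range' pos p.length
    match t with
    | [] => idxs
    | _ :: _ =>
        idxs ++ (if p ≠ [] ∨ first = true then [pos + p.length] else [])
             ++ pvWalk t (pos + p.length + 1) false

-- text.split(' ') is List.splitOn ' ' on the characters (exact for a one-character separator);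
-- then join the kept chars and build the remap dict from enumerate(keep).
def normalize_spaces_py_alt (text : String) (mapping : List (Int × List Int)) : String × (List (Int × List Int)) :=
  let cs := text.toList
  let keep := pvWalk (cs.splitOn ' ') 0 true
  let cleaned := String.ofList (keep.map (fun i => cs.getD i ' '))
  let nm := (PySem.List.enumerate keep 0).map
    (fun q => (q.1, ((mapping.lookup ((q.2 : Int))).getD [(q.2 : Int)])))
  (cleaned, nm)

-- ===== PRECONDITION & SPEC =====
def Spec_normalize_spaces_py (text : String) (mapping : List (Int × List Int)) (out : String × (List (Int × List Int))) : Prop := out = normalize_spaces_py_alt text mapping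
instance (text : String) (mapping : List (Int × List Int)) (out : String × (List (Int × List Int))) : Decidable (Spec_normalize_spaces_py text mapping out) := by unfold Spec_normalize_spaces_py; infer_instance

-- ===== CLAIM (what is proved, stated in full; the proofs are below) =====
def Claim_equal_normalize_spaces_py : Prop := ∀ (text : String) (mapping : List (Int × List Int)), Dom_normalize_spaces_py text mapping → Spec_normalize_spaces_py text mapping (normalize_spaces_py text mapping)

-- ===== LEMMAS AND PROOFS =====

theorem pvSkipSpaces_le (cs : List Char) (i : Nat) (h : i ≤ cs.length) : pvSkipSpaces cs i ≤ cs.length := by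
  induction i using pvSkipSpaces.induct (cs := cs) with
  | case1 i h1 ih => rw [pvSkipSpaces, dif_pos h1]; exact ih (by omega)
  | case2 i h1 => rw [pvSkipSpaces, dif_neg h1]; exact h

theorem pvSkipSpaces_mid (cs : List Char) (i : Nat) :
    ∀ k, i ≤ k → k < pvSkipSpaces cs i → cs.getD k ' ' = ' ' := by
  induction i using pvSkipSpaces.induct (cs := cs) with
  | case1 i h1 ih =>
    intro k hk1 hk2
    rw [pvSkipSpaces, dif_pos h1] at hk2
    rcases Nat.eq_or_lt_of_le hk1 with rfl | hlt
    · exact h1.2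
    · exact ih k hlt hk2
  | case2 i h1 =>
    intro k hk1 hk2
    rw [pvSkipSpaces, dif_neg h1] at hk2
    omega

theorem pvSkipSpaces_stop (cs : List Char) (i : Nat) (h : pvSkipSpaces cs i < cs.length) :
    cs.getD (pvSkipSpaces cs i) ' ' ≠ ' ' := by
  induction i using pvSkipSpaces.induct (cs := cs) with
  | case1 i h1 ih =>
    rw [pvSkipSpaces, dif_pos h1] at h ⊢
    exact ih h
  | case2 i h1 =>
    rw [pvSkipSpaces, dif_neg h1] at h ⊢
    intro hsp
    exact h1 ⟨h, hsp⟩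

-- proof-side keep predicate: index i survives unless it is a space preceded by a space
def pvKeepP (cs : List Char) (i : Nat) : Bool :=
  !(cs.getD i ' ' == ' ' && decide (0 < i) && cs.getD (i - 1) ' ' == ' ')

-- B's phase 2, started at an arbitrary counter value (= A's cleaned_idx)
def pvF (mapping : List (Int × List Int)) (c : Int) (l : List Nat) : List (Int × List Int) :=
  (PySem.List.enumerate l c).map (fun q => (q.1, ((mapping.lookup ((q.2 : Int))).getD [(q.2 : Int)])))

theorem pvF_cons (mapping : List (Int × List Int)) (c : Int) (j : Nat) (t : List Nat) :
    pvF mapping c (j :: t) = (c, ((mapping.lookup ((j : Int))).getD [(j : Int)])) :: pvF mapping (c+1) t := by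
  simp [pvF, PySem.List.enumerate_cons]

-- the surviving indices from position i on
def pvKeepFrom (cs : List Char) (i : Nat) : List Nat :=
  (List.range' i (cs.length - i)).filter (pvKeepP cs)

theorem pvKeepFrom_end (cs : List Char) (i : Nat) (h : cs.length ≤ i) : pvKeepFrom cs i = [] := by
  simp [pvKeepFrom, Nat.sub_eq_zero_of_le h]

theorem pvKeepFrom_cons (cs : List Char) (i : Nat) (h : i < cs.length) (hp : pvKeepP cs i = true) :
    pvKeepFrom cs i = i :: pvKeepFrom cs (i+1) := by
  have : cs.length - i = (cs.length - (i+1)) + 1 := by omega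
  rw [pvKeepFrom, this, List.range'_succ, List.filter_cons, if_pos hp]
  rfl

theorem pvKeepFrom_cons_neg (cs : List Char) (i : Nat) (h : i < cs.length) (hp : pvKeepP cs i = false) :
    pvKeepFrom cs i = pvKeepFrom cs (i+1) := by
  have : cs.length - i = (cs.length - (i+1)) + 1 := by omega
  rw [pvKeepFrom, this, List.range'_succ, List.filter_cons, if_neg (by simp [hp])]
  rfl

theorem pvKeepP_zero (cs : List Char) : pvKeepP cs 0 = true := by
  simp [pvKeepP]

theorem pvKeepP_false (cs : List Char) (k : Nat) (h1 : cs.getD k ' ' = ' ')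
    (h2 : 0 < k) (h3 : cs.getD (k-1) ' ' = ' ') : pvKeepP cs k = false := by
  unfold pvKeepP
  rw [h1, h3]
  simp [h2]

theorem pvKeepP_of_not_space (cs : List Char) (k : Nat) (h : cs.getD k ' ' ≠ ' ') :
    pvKeepP cs k = true := by
  unfold pvKeepP
  rw [beq_eq_false_iff_ne.mpr h]
  simp

theorem pvKeepP_of_prev_not_space (cs : List Char) (k : Nat) (h : cs.getD (k-1) ' ' ≠ ' ') :
    pvKeepP cs k = true := by
  unfold pvKeepP
  rw [beq_eq_false_iff_ne.mpr h]
  simp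

-- between a kept space and the next stop of the skip loop every index is a dropped space,
-- so one outer iteration of A consumes exactly one element of the keep list
theorem pvKeepFrom_skip (cs : List Char) (i : Nat) (hi : i < cs.length)
    (hsp : cs.getD i ' ' = ' ') (hp : pvKeepP cs i = true) :
    pvKeepFrom cs i = i :: pvKeepFrom cs (pvSkipSpaces cs (i+1)) := by
  have hge := pvSkipSpaces_ge cs (i+1)
  have hle := pvSkipSpaces_le cs (i+1) (by omega)
  have hmid := pvSkipSpaces_mid cs (i+1)
  rw [pvKeepFrom_cons cs i hi hp]
  congr 1
  generalize hj : pvSkipSpaces cs (i+1) = j at hge hle hmid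
  have hsplit : List.range' (i+1) (cs.length - (i+1)) =
      List.range' (i+1) (j - (i+1)) ++ List.range' j (cs.length - j) := by
    rw [show cs.length - (i+1) = (j - (i+1)) + (cs.length - j) by omega,
        ← List.range'_append_1, show i + 1 + (j - (i+1)) = j by omega]
  have hnil : (List.range' (i+1) (j - (i+1))).filter (pvKeepP cs) = [] := by
    rw [List.filter_eq_nil_iff]
    intro k hk
    rw [List.mem_range'_1] at hk
    have hk2 : k < j := by omega
    have h1 : cs.getD k ' ' = ' ' := hmid k hk.1 hk2
    have h2 : cs.getD (k-1) ' ' = ' ' := by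
      rcases Nat.eq_or_lt_of_le hk.1 with heq | hlt
      · rw [show k - 1 = i by omega]; exact hsp
      · exact hmid (k-1) (by omega) (by omega)
    simp [pvKeepP_false cs k h1 (by omega) h2]
  rw [pvKeepFrom, hsplit, List.filter_append, hnil, List.nil_append, pvKeepFrom]

-- loop invariant: from any state (i, cidx, res, nm) with the keep-predicate holding at i,
-- A's loop appends exactly the materialisation of pvKeepFrom i
theorem pvMain (cs : List Char) (mapping : List (Int × List Int)) :
    ∀ (fuel i : Nat) (cidx : Int) (res : List Char) (nm : List (Int × List Int)),
      cs.length - i ≤ fuel → (i < cs.length → pvKeepP cs i = true) →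
      pvALoop cs mapping i cidx res nm =
        (res ++ (pvKeepFrom cs i).map (fun j => cs.getD j ' '),
         nm ++ pvF mapping cidx (pvKeepFrom cs i)) := by
  intro fuel
  induction fuel with
  | zero =>
    intro i cidx res nm hf _
    have hi : cs.length ≤ i := by omega
    rw [pvALoop, dif_neg (by omega), pvKeepFrom_end cs i hi]
    simp [pvF, PySem.List.enumerate]
  | succ fuel ih =>
    intro i cidx res nm hf hp
    by_cases hi : i < cs.length
    · rw [pvALoop, dif_pos hi]
      simp only []
      by_cases hsp : cs.getD i ' ' = ' '
      · rw [if_pos hsp]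
        have hge := pvSkipSpaces_ge cs (i+1)
        rw [ih (pvSkipSpaces cs (i+1)) (cidx+1) _ _ (by omega)
            (fun hlt => pvKeepP_of_not_space cs _ (pvSkipSpaces_stop cs (i+1) hlt))]
        rw [pvKeepFrom_skip cs i hi hsp (hp hi)]
        simp [pvF_cons]
      · rw [if_neg hsp]
        rw [ih (i+1) (cidx+1) _ _ (by omega)
            (fun _ => pvKeepP_of_prev_not_space cs (i+1) (by simpa using hsp))]
        rw [pvKeepFrom_cons cs i hi (hp hi)]
        simp [pvF_cons]
    · rw [pvALoop, dif_neg hi, pvKeepFrom_end cs i (by omega)]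
      simp [pvF, PySem.List.enumerate]

-- ===== B side: pvWalk ∘ splitOn equals the keep list =====

-- character-wise specification of the surviving indices (proof device)
def pvKeepRec (ds : List Char) (pos : Nat) (prevSpace : Bool) : List Nat :=
  match ds with
  | [] => []
  | c :: t => (if c = ' ' ∧ prevSpace = true then [] else [pos]) ++ pvKeepRec t (pos+1) (c == ' ')

theorem pvWalk_cons_nonsep (c : Char) (q : List Char) (qs : List (List Char)) (pos : Nat) (first : Bool) :
    pvWalk ((c :: q) :: qs) pos first = pos :: pvWalk (q :: qs) (pos + 1) true := by
  cases qs with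
  | nil => simp [pvWalk, List.range'_succ]
  | cons a as =>
    have h : pos + (c :: q).length = pos + 1 + q.length := by simp; omega
    simp only [pvWalk, ne_eq, reduceCtorEq, not_false_iff, true_or, or_true, if_pos,
      List.length_cons]
    rw [show pos + (q.length + 1) = pos + 1 + q.length by omega,
        List.range'_succ]
    simp [List.append_assoc]

-- pvWalk over the split equals the character-wise keep recursion
theorem pvWalk_splitOnP (ds : List Char) :
    ∀ (pos : Nat) (first : Bool),
      pvWalk (ds.splitOnP (· == ' ')) pos first = pvKeepRec ds pos (!first) := by
  induction ds with
  | nil => intro pos first; simp [List.splitOnP_nil, pvWalk, pvKeepRec]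
  | cons c t ih =>
    intro pos first
    rw [List.splitOnP_cons]
    by_cases hc : c = ' '
    · rw [if_pos (by simp [hc])]
      rcases hq : t.splitOnP (· == ' ') with _ | ⟨q, qs⟩
      · exact absurd hq (List.splitOnP_ne_nil _ t)
      · have hW : pvWalk ([] :: q :: qs) pos first =
            (if first then [pos] else []) ++ pvWalk (q :: qs) (pos + 1) false := by
          cases first <;> simp [pvWalk]
        rw [hW, show (q :: qs) = t.splitOnP (· == ' ') from hq.symm, ih]
        cases first <;> simp [pvKeepRec, hc]
    · rw [if_neg (by simp [hc])]
      rcases hq : t.splitOnP (· == ' ') with _ | ⟨q, qs⟩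
      · exact absurd hq (List.splitOnP_ne_nil _ t)
      · rw [List.modifyHead_cons, pvWalk_cons_nonsep,
            show (q :: qs) = t.splitOnP (· == ' ') from hq.symm, ih]
        cases first <;> simp [pvKeepRec, hc, beq_eq_false_iff_ne.mpr hc]

-- the keep recursion on the suffix equals the filtered range
theorem pvKeepRec_eq (cs : List Char) :
    ∀ (fuel pos : Nat), cs.length - pos ≤ fuel → pos ≤ cs.length →
      pvKeepRec (cs.drop pos) pos (decide (0 < pos) && (cs.getD (pos-1) ' ' == ' ')) =
        pvKeepFrom cs pos := by
  intro fuel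
  induction fuel with
  | zero =>
    intro pos hf hle
    have h : cs.length ≤ pos := by omega
    rw [List.drop_eq_nil_of_le h, pvKeepFrom_end cs pos h]
    rfl
  | succ fuel ih =>
    intro pos hf hle
    by_cases hi : pos < cs.length
    · have hd : cs.drop pos = cs[pos] :: cs.drop (pos+1) := List.drop_eq_getElem_cons hi
      have hg : cs.getD pos ' ' = cs[pos] := List.getD_eq_getElem cs ' ' hi
      rw [hd]
      show (if cs[pos] = ' ' ∧ (decide (0 < pos) && (cs.getD (pos-1) ' ' == ' ')) = true
              then [] else [pos]) ++ pvKeepRec (cs.drop (pos+1)) (pos+1) (cs[pos] == ' ') =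
           pvKeepFrom cs pos
      have hrec : pvKeepRec (cs.drop (pos+1)) (pos+1) (cs[pos] == ' ') =
          pvKeepFrom cs (pos+1) := by
        have := ih (pos+1) (by omega) (by omega)
        have hdec : decide (0 < pos + 1) = true := by simp
        simp only [hdec, Bool.true_and, Nat.add_sub_cancel] at this
        rw [hg] at this
        exact this
      by_cases hC : cs[pos] = ' ' ∧ (decide (0 < pos) && (cs.getD (pos-1) ' ' == ' ')) = true
      · have h2 : 0 < pos := by
          rcases hC with ⟨_, hb⟩
          by_contra hn
          simp [Nat.le_zero.mp (Nat.not_lt.mp hn)] at hb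
        have h3 : cs.getD (pos-1) ' ' = ' ' := by
          rcases hC with ⟨_, hb⟩
          simp [h2] at hb
          exact hb
        have hkp : pvKeepP cs pos = false :=
          pvKeepP_false cs pos (by rw [hg]; exact hC.1) h2 h3
        rw [if_pos hC, List.nil_append, hrec, pvKeepFrom_cons_neg cs pos hi hkp]
      · have hkp : pvKeepP cs pos = true := by
          by_contra hn
          apply hC
          have hb : (cs.getD pos ' ' == ' ' && decide (0 < pos) && (cs.getD (pos-1) ' ' == ' ')) = true := by
            unfold pvKeepP at hn
            revert hn
            cases h : (cs.getD pos ' ' == ' ' && decide (0 < pos) && (cs.getD (pos-1) ' ' == ' ')) <;> simp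
          rcases (by simpa using hb :
              (cs.getD pos ' ' = ' ' ∧ 0 < pos) ∧ cs.getD (pos-1) ' ' = ' ') with ⟨⟨hb0, hb2⟩, hb3⟩
          refine ⟨by rw [← hg]; exact hb0, ?_⟩
          simp only [List.getD] at hb3 ⊢
          simp [hb2, hb3]
        rw [if_neg hC, hrec, pvKeepFrom_cons cs pos hi hkp]
        rfl
    · have h : cs.length ≤ pos := by omega
      rw [List.drop_eq_nil_of_le h, pvKeepFrom_end cs pos h]
      rfl

-- ===== VERDICT (by name: the statement is the Claim_ definition above) =====
theorem normalize_spaces_py_spec : Claim_equal_normalize_spaces_py := by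
  intro text mapping _
  show normalize_spaces_py text mapping = normalize_spaces_py_alt text mapping
  unfold normalize_spaces_py normalize_spaces_py_alt
  simp only []
  rw [pvMain text.toList mapping text.toList.length 0 0 [] [] (by omega) (fun _ => pvKeepP_zero _)]
  have hk : pvWalk (text.toList.splitOn ' ') 0 true = pvKeepFrom text.toList 0 := by
    rw [List.splitOn, pvWalk_splitOnP]
    have := pvKeepRec_eq text.toList text.toList.length 0 (by omega) (by omega)
    simpa using this
  rw [hk]
  simp [pvF]
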